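-- pv_equiv track=rewrite | github.com/msjo91/BD_SNU | programming/QTR1/assignment/0628_loop_n_matrix.py | f14_b
-- ===== SOURCE A (Python) =====
-- def f14_b(rows, cols):
--     """Return a two dimensional list where each element corresponds to how many adjacent neighbors it has."""
--     new_mat = []
--     for row in range(rows):
--         new_mat += [[0] * cols]
--     for row in range(rows):
--         for col in range(cols):
--             ans = 0
--             if row - 1 in range(rows):
--                 ans += 1
--             if row + 1 in range(rows):
--                 ans += 1
--             if col - 1 in range(cols):
--                 ans += 1
--             if col + 1 in range(cols):
--                 ans += 1
--             new_mat[row][col] = ans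
--     return new_mat
-- ===== SOURCE B (Python) =====
-- def f14_b(rows, cols):
--     """Return a two dimensional list where each element corresponds to how many adjacent neighbors it has."""
--     if rows <= 0:
--         return []
--     vrow = [(1 if r - 1 >= 0 else 0) + (1 if r + 1 < rows else 0) for r in range(rows)]
--     hcol = [(1 if c - 1 >= 0 else 0) + (1 if c + 1 < cols else 0) for c in range(cols)]
--     return [[v + h for h in hcol] for v in vrow]
-- ===== Notes on version B (the rewrite author's own statement) =====
-- stated objective: simpler
-- what changed: Exploits separability of orthogonal-neighbor counts: two precomputed 1-D edge profiles (per-row and per-column neighbor counts) combined by one nested comprehension (with an early return when there are no rows), instead of a zero matrix mutated in place with four per-cell range-membership tests.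
import Mathlib
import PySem

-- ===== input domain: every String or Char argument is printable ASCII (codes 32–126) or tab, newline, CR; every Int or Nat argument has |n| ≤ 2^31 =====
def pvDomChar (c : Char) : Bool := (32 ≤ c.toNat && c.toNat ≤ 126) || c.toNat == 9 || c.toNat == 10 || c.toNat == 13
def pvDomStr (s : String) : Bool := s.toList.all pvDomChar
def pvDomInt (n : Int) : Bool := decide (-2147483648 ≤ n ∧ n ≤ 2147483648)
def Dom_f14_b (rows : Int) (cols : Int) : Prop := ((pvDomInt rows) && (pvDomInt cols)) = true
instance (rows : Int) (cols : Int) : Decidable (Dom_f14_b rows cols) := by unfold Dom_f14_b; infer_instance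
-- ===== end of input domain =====

-- B replaces A's in-place mutation of a zero matrix (four range-membership tests per cell)
-- by two precomputed 1-D edge profiles combined with one nested comprehension (objective: simpler).

-- ===== PORT A =====
-- Literal port of A: build a zero matrix by repeated append, then mutate each cell via set.
-- `[0] * cols` is `List.replicate cols.toNat 0` (Python repetition with a non-positive count gives []).
-- `new_mat[row]` is read with `[·]?.getD []`; `row` is always in range here, so this matches Python.
def f14_b (rows : Int) (cols : Int) : List (List Int) :=
  let new_mat := (PySem.List.pyRange 0 rows 1).foldl
    (fun m _row => m ++ [List.replicate cols.toNat (0 : Int)]) []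
  (PySem.List.pyRange 0 rows 1).foldl (fun m row =>
    (PySem.List.pyRange 0 cols 1).foldl (fun m col =>
      let ans : Int :=
        (if 0 ≤ row - 1 ∧ row - 1 < rows then 1 else 0)
        + (if 0 ≤ row + 1 ∧ row + 1 < rows then 1 else 0)
        + (if 0 ≤ col - 1 ∧ col - 1 < cols then 1 else 0)
        + (if 0 ≤ col + 1 ∧ col + 1 < cols then 1 else 0)
      m.set row.toNat ((m[row.toNat]?.getD []).set col.toNat ans)) m) new_mat

-- ===== PORT B =====
-- Literal port of B: early return for no rows, then two 1-D comprehensions (edge profiles),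
-- combined by a nested map.
def f14_b_alt (rows : Int) (cols : Int) : List (List Int) :=
  if rows ≤ 0 then [] else
  let vrow := (PySem.List.pyRange 0 rows 1).map (fun r =>
    (if r - 1 ≥ 0 then (1 : Int) else 0) + (if r + 1 < rows then 1 else 0))
  let hcol := (PySem.List.pyRange 0 cols 1).map (fun c =>
    (if c - 1 ≥ 0 then (1 : Int) else 0) + (if c + 1 < cols then 1 else 0))
  vrow.map (fun v => hcol.map (fun h => v + h))

-- ===== PRECONDITION & SPEC =====
def Spec_f14_b (rows : Int) (cols : Int) (out : List (List Int)) : Prop := out = f14_b_alt rows cols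
instance (rows : Int) (cols : Int) (out : List (List Int)) : Decidable (Spec_f14_b rows cols out) := by unfold Spec_f14_b; infer_instance

-- ===== CLAIM (what is proved, stated in full; the proofs are below) =====
def Claim_equal_f14_b : Prop := ∀ (rows : Int) (cols : Int), Dom_f14_b rows cols → Spec_f14_b rows cols (f14_b rows cols)

-- ===== LEMMAS AND PROOFS =====

-- Building the zero matrix by repeated append is replication.
theorem foldl_append_singleton {α β : Type} (x : α) :
    ∀ (L : List β) (acc : List α),
      L.foldl (fun m _ => m ++ [x]) acc = acc ++ List.replicate L.length x := by
  intro L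
  induction L with
  | nil => simp
  | cons a L ih =>
    intro acc
    rw [List.foldl_cons, ih]
    simp [List.replicate_succ]

-- `m.set rN (m[rN])` is `m` when in range
theorem set_getD_self (m : List (List Int)) (rN : Nat) (d : List Int)
    (h : rN < m.length) : m.set rN (m[rN]?.getD d) = m := by
  rw [List.getElem?_eq_getElem h]
  simp

-- The inner column loop only touches row `rN`; lift it to a single `set` of that row.
theorem inner_lift (L : List Int) (g : Int → Int) (rN : Nat) :
    ∀ (m : List (List Int)),
      L.foldl (fun m col => m.set rN ((m[rN]?.getD []).set col.toNat (g col))) m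
        = m.set rN (L.foldl (fun l col => l.set col.toNat (g col)) (m[rN]?.getD [])) := by
  induction L with
  | nil =>
    intro m
    simp only [List.foldl_nil]
    by_cases h : rN < m.length
    · exact (set_getD_self m rN [] h).symm
    · rw [List.set_eq_of_length_le (by omega : m.length ≤ rN)]
  | cons a L ih =>
    intro m
    simp only [List.foldl_cons, ih]
    by_cases h : rN < m.length
    · rw [List.getElem?_set_self (by omega), List.getElem?_eq_getElem h]
      simp [List.set_set]
    · rw [List.set_eq_of_length_le (by omega : m.length ≤ rN),
        List.getElem?_eq_none (by omega : m.length ≤ rN)]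
      simp

-- Filling positions 0..n-1 of a list by `set`, where each new value may read the old one.
theorem foldl_set_range {α : Type} (d : α) (F : Nat → α → α) :
    ∀ (n : Nat) (l : List α), n ≤ l.length →
      (List.range n).foldl (fun m k => m.set k (F k (m[k]?.getD d))) l
        = (List.range n).map (fun k => F k (l[k]?.getD d)) ++ l.drop n := by
  intro n
  induction n with
  | zero => simp
  | succ n ih =>
    intro l hl
    rw [List.range_succ, List.foldl_append, List.foldl_cons, List.foldl_nil,
      ih l (by omega)]
    have hmaplen : ((List.range n).map (fun k => F k (l[k]?.getD d))).length = n := by simp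
    have hdrop : l.drop n = l[n] :: l.drop (n + 1) :=
      (List.drop_eq_getElem_cons (by omega)).trans rfl
    rw [List.getElem?_append_right (by omega), List.set_append_right _ _ (by omega)]
    simp only [hmaplen, Nat.sub_self]
    rw [hdrop, List.set_cons_zero, List.getElem?_cons_zero, Option.getD_some,
      List.map_append]
    simp [List.getElem?_eq_getElem (show n < l.length by omega)]
    rfl

-- `pyRange`-indexed filling loop, in terms of `List.range`.
theorem pyfold_set {α : Type} (n : Int) (d : α) (F : Int → α → α) (l : List α)
    (h : n.toNat ≤ l.length) :
    (PySem.List.pyRange 0 n 1).foldl (fun m i => m.set i.toNat (F i (m[i.toNat]?.getD d))) l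
      = (List.range n.toNat).map (fun (k : Nat) => F (↑k) (l[k]?.getD d)) ++ l.drop n.toNat := by
  rw [PySem.List.pyRange_one, List.foldl_map]
  simp only [Int.sub_zero, zero_add, Int.toNat_natCast]
  exact foldl_set_range d (fun (k : Nat) => F (↑k)) n.toNat l h

-- A computes the map-of-map matrix.
theorem f14_b_eq (rows cols : Int) :
    f14_b rows cols = (List.range rows.toNat).map (fun (r : Nat) =>
      (List.range cols.toNat).map (fun (c : Nat) =>
        (if 0 ≤ (r : Int) - 1 ∧ (r : Int) - 1 < rows then (1 : Int) else 0)
        + (if 0 ≤ (r : Int) + 1 ∧ (r : Int) + 1 < rows then 1 else 0)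
        + (if 0 ≤ (c : Int) - 1 ∧ (c : Int) - 1 < cols then 1 else 0)
        + (if 0 ≤ (c : Int) + 1 ∧ (c : Int) + 1 < cols then 1 else 0))) := by
  unfold f14_b
  rw [foldl_append_singleton]
  simp only [List.nil_append, PySem.List.length_pyRange_one, Int.sub_zero]
  simp only [inner_lift]
  rw [pyfold_set rows [] (fun i cur =>
      (PySem.List.pyRange 0 cols 1).foldl (fun l col => l.set col.toNat
        ((((if 0 ≤ i - 1 ∧ i - 1 < rows then (1 : Int) else 0)
          + if 0 ≤ i + 1 ∧ i + 1 < rows then 1 else 0)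
          + if 0 ≤ col - 1 ∧ col - 1 < cols then 1 else 0)
          + if 0 ≤ col + 1 ∧ col + 1 < cols then 1 else 0)) cur)
      _ (by simp)]
  rw [List.drop_replicate]
  simp only [Nat.sub_self, List.replicate_zero, List.append_nil]
  apply List.map_congr_left
  intro r hr
  rw [List.mem_range] at hr
  rw [List.getElem?_replicate, if_pos hr, Option.getD_some]
  rw [pyfold_set cols (0 : Int) (fun c _ =>
      (if 0 ≤ (r : Int) - 1 ∧ (r : Int) - 1 < rows then (1 : Int) else 0)
      + (if 0 ≤ (r : Int) + 1 ∧ (r : Int) + 1 < rows then 1 else 0)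
      + (if 0 ≤ c - 1 ∧ c - 1 < cols then 1 else 0)
      + (if 0 ≤ c + 1 ∧ c + 1 < cols then 1 else 0)) _ (by simp)]
  rw [List.drop_replicate]
  simp

-- B computes the map-of-map matrix.
theorem f14_b_alt_eq (rows cols : Int) :
    f14_b_alt rows cols = (List.range rows.toNat).map (fun (r : Nat) =>
      (List.range cols.toNat).map (fun (c : Nat) =>
        ((if (r : Int) - 1 ≥ 0 then (1 : Int) else 0) + (if (r : Int) + 1 < rows then 1 else 0))
        + ((if (c : Int) - 1 ≥ 0 then (1 : Int) else 0) + (if (c : Int) + 1 < cols then 1 else 0)))) := by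
  unfold f14_b_alt
  by_cases h : rows ≤ 0
  · simp [h, Int.toNat_of_nonpos h]
  · simp [h, PySem.List.pyRange_one, List.map_map, Function.comp_def]

-- ===== VERDICT (by name: the statement is the Claim_ definition above) =====
theorem f14_b_spec : Claim_equal_f14_b := by
  intro rows cols _
  show f14_b rows cols = f14_b_alt rows cols
  rw [f14_b_eq, f14_b_alt_eq]
  apply List.map_congr_left
  intro r hr
  apply List.map_congr_left
  intro c hc
  rw [List.mem_range] at hr hc
  have hrlt : (r : Int) < rows := by omega
  have hclt : (c : Int) < cols := by omega
  have h1 : ((r : Int) - 1 < rows) := by omega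
  have h2 : (0 ≤ (r : Int) + 1) := by omega
  have h3 : ((c : Int) - 1 < cols) := by omega
  have h4 : (0 ≤ (c : Int) + 1) := by omega
  split_ifs <;> omega
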